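-- pv_equiv track=rewrite | github.com/RWKV-APP/RWKV_APP | tools/run_local_chat_eval.py | finalize_sample_status
-- ===== SOURCE A (Python) =====
-- def finalize_sample_status(sample: dict) -> str:
--     if not sample["attempts"]:
--         return "pending"
--     if all(attempt["status"] == "completed" for attempt in sample["attempts"]):
--         return "completed"
--     if any(attempt["status"] == "completed" for attempt in sample["attempts"]):
--         return "partial"
--     return "error"
-- ===== SOURCE B (Python) =====
-- def finalize_sample_status(sample: dict) -> str:
--     # Finite-state machine over the attempt stream; the state IS the answer so far.
--     state = "pending"
--     for attempt in sample["attempts"]: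
--         done = attempt["status"] == "completed"
--         if state == "pending":
--             state = "completed" if done else "error"
--         elif state == "completed" and not done:
--             return "partial"
--         elif state == "error" and done:
--             return "partial"
--     return state
-- ===== Notes on version B (the rewrite author's own statement) =====
-- stated objective: alternative
-- what changed: Replaces A's two staged all/any generator scans with a single-pass finite-state machine whose state variable is the eventual answer string ('pending'/'completed'/'error'), early-returning 'partial' as soon as both a completed and a non-completed attempt have been seen.
import Mathlib
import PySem

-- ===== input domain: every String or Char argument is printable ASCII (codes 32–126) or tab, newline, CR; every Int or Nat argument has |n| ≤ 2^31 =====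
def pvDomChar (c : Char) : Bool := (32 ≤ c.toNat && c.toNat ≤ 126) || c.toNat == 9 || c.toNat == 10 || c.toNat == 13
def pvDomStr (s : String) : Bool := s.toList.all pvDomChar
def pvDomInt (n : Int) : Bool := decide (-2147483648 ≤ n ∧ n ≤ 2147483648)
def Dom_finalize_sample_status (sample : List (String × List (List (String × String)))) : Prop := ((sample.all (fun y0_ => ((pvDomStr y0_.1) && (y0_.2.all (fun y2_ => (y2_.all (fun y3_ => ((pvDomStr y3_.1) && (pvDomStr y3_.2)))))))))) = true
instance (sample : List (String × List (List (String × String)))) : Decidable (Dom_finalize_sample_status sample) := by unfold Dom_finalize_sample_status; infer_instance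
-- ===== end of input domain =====

-- B replaces A's two staged all/any scans with a single-pass state machine whose
-- state is the eventual answer string (alternative decomposition, same cost).

-- ===== PORT A =====
-- A: guard on emptiness, then all(status == "completed"), then any(status == "completed").
def finalize_sample_status (sample : List (String × List (List (String × String)))) : String :=
  let attempts := (PySem.Dict.mk sample).getD "attempts" []
  if attempts.isEmpty then "pending"
  else if attempts.all (fun a => (PySem.Dict.mk a).getD "status" "" == "completed") then "completed"
  else if attempts.any (fun a => (PySem.Dict.mk a).getD "status" "" == "completed") then "partial"
  else "error"

-- ===== PORT B =====
-- B's loop: state starts "pending"; each attempt either sets the state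
-- ("completed"/"error" from "pending") or forces an early return of "partial".
def finalize_sample_status_altLoop (state : String) (attempts : List (List (String × String))) : String :=
  match attempts with
  | [] => state
  | a :: rest =>
    let done := (PySem.Dict.mk a).getD "status" "" == "completed"
    if state == "pending" then
      finalize_sample_status_altLoop (if done then "completed" else "error") rest
    else if state == "completed" && !done then "partial"
    else if state == "error" && done then "partial"
    else finalize_sample_status_altLoop state rest

def finalize_sample_status_alt (sample : List (String × List (List (String × String)))) : String :=
  finalize_sample_status_altLoop "pending" ((PySem.Dict.mk sample).getD "attempts" [])

-- ===== PRECONDITION & SPEC =====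
-- Pre_ excludes exactly the inputs on which the Python A raises KeyError:
-- "attempts" missing, or an attempt without a "status" key at a position that
-- A's short-circuiting scans actually read (i.e. with no earlier completed /
-- non-completed pair); B raises KeyError on exactly the same inputs.
def Pre_finalize_sample_status (sample : List (String × List (List (String × String)))) : Prop :=
  ((PySem.Dict.mk sample).get? "attempts").isSome = true ∧
  (let attempts := (PySem.Dict.mk sample).getD "attempts" []
   ∀ k < attempts.length,
     ((PySem.Dict.mk (attempts.getD k [])).get? "status").isSome = false →
     (∃ i < k, (PySem.Dict.mk (attempts.getD i [])).getD "status" "" = "completed") ∧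
     (∃ j < k, (PySem.Dict.mk (attempts.getD j [])).getD "status" "" ≠ "completed"))
instance (sample : List (String × List (List (String × String)))) : Decidable (Pre_finalize_sample_status sample) := by unfold Pre_finalize_sample_status; infer_instance

def pvWitness_finalize_sample_status : (List (String × List (List (String × String)))) :=
  [("attempts", [[("status", "completed")], [("status", "error")]])]

def Spec_finalize_sample_status (sample : List (String × List (List (String × String)))) (out : String) : Prop := out = finalize_sample_status_alt sample
instance (sample : List (String × List (List (String × String)))) (out : String) : Decidable (Spec_finalize_sample_status sample out) := by unfold Spec_finalize_sample_status; infer_instance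

-- ===== CLAIM (what is proved, stated in full; the proofs are below) =====
def Claim_equal_finalize_sample_status : Prop := ∀ (sample : List (String × List (List (String × String)))), Dom_finalize_sample_status sample → Pre_finalize_sample_status sample → Spec_finalize_sample_status sample (finalize_sample_status sample)

-- ===== LEMMAS AND PROOFS =====

-- In state "completed" the machine returns "completed" iff every remaining attempt is done.
theorem altLoop_completed (l : List (List (String × String))) :
    finalize_sample_status_altLoop "completed" l
      = if l.all (fun a => (PySem.Dict.mk a).getD "status" "" == "completed") then "completed" else "partial" := by
  induction l with
  | nil => simp [finalize_sample_status_altLoop]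
  | cons a rest ih =>
    by_cases h : ((PySem.Dict.mk a).getD "status" "" == "completed") = true <;>
      simp [finalize_sample_status_altLoop, h, ih]

-- In state "error" the machine returns "partial" iff some remaining attempt is done.
theorem altLoop_error (l : List (List (String × String))) :
    finalize_sample_status_altLoop "error" l
      = if l.any (fun a => (PySem.Dict.mk a).getD "status" "" == "completed") then "partial" else "error" := by
  induction l with
  | nil => simp [finalize_sample_status_altLoop]
  | cons a rest ih =>
    by_cases h : ((PySem.Dict.mk a).getD "status" "" == "completed") = true <;>
      simp [finalize_sample_status_altLoop, h, ih]

-- The state machine from "pending" computes A's empty/all/any classification.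
theorem altLoop_pending (l : List (List (String × String))) :
    finalize_sample_status_altLoop "pending" l
      = (if l.isEmpty then "pending"
         else if l.all (fun a => (PySem.Dict.mk a).getD "status" "" == "completed") then "completed"
         else if l.any (fun a => (PySem.Dict.mk a).getD "status" "" == "completed") then "partial"
         else "error") := by
  cases l with
  | nil => simp [finalize_sample_status_altLoop]
  | cons a rest =>
    by_cases h : ((PySem.Dict.mk a).getD "status" "" == "completed") = true
    · simp [finalize_sample_status_altLoop, h, altLoop_completed]
    · simp [finalize_sample_status_altLoop, h, altLoop_error]

-- ===== VERDICT (by name: the statement is the Claim_ definition above) =====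
theorem finalize_sample_status_spec : Claim_equal_finalize_sample_status := by
  intro sample _ _
  unfold Spec_finalize_sample_status finalize_sample_status finalize_sample_status_alt
  exact (altLoop_pending _).symm
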